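-- pv_equiv track=rewrite | github.com/parasiitism/AlgoDaily | glassdoor/bloomberg/candy-crush-1d/main.py | candy_crush_1d
-- ===== SOURCE A (Python) =====
-- def candy_crush_1d(s):
--     stack = []  # (char, count)
--     for c in s:
--         if len(stack) > 0 and stack[-1][0] == c:
--             stack[-1][1] += 1
--         else:
--             if len(stack) > 0 and stack[-1][1] >= 3:
--                 stack.pop()
--             if len(stack) > 0 and stack[-1][0] == c:
--                 stack[-1][1] += 1
--             else:
--                 stack.append([c, 1])
--     if len(stack) > 0 and stack[-1][1] >= 3:
--         stack.pop()
--     res = ''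
--     for c, count in stack:
--         res += count * c
--     return res
-- ===== SOURCE B (Python) =====
-- def candy_crush_1d(s):
--     # Fixpoint rewriting: repeatedly delete the leftmost maximal run of
--     # 3+ equal chars; stop when no such run remains.
--     def step(t):
--         i = 0
--         while i < len(t):
--             j = i
--             while j < len(t) and t[j] == t[i]:
--                 j += 1
--             if j - i >= 3:
--                 return t[:i] + t[j:]
--             i = j
--         return None
--     while True:
--         t = step(s)
--         if t is None:
--             return s
--         s = t
-- ===== Notes on version B (the rewrite author's own statement) =====
-- stated objective: alternative
-- what changed: Replaces A's single-pass stack of (char,count) pairs with cascade-on-pop by a fixpoint rewriting loop that repeatedly scans for and deletes the leftmost maximal run of 3+ equal characters until none remains.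
import Mathlib
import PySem

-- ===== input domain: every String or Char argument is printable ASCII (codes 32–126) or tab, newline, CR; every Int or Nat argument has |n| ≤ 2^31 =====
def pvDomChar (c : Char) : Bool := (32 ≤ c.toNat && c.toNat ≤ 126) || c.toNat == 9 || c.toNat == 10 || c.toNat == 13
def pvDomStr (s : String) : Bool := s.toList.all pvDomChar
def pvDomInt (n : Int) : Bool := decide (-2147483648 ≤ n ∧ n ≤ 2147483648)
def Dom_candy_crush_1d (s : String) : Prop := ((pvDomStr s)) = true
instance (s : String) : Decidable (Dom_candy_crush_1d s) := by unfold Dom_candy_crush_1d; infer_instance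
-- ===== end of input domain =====

-- B replaces A's one-pass count-stack with a fixpoint loop that repeatedly deletes the
-- leftmost maximal run of 3+ equal characters (alternative decomposition, not faster).

-- ===== PORT A =====
-- stack of (char, count); head of the list is the TOP of the Python stack (stack[-1])
def pushA (st : List (Char × Int)) (c : Char) : List (Char × Int) :=
  match st with
  | [] => [(c, 1)]
  | (d, k) :: r =>
    if d = c then (d, k + 1) :: r            -- stack[-1][1] += 1
    else
      match (if k ≥ 3 then r else (d, k) :: r) with   -- pop if top count >= 3
      | [] => [(c, 1)]
      | (e, m) :: r2 => if e = c then (e, m + 1) :: r2 else (c, 1) :: (e, m) :: r2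

-- the trailing 'if stack and stack[-1][1] >= 3: stack.pop()'
def finalizeA (st : List (Char × Int)) : List (Char × Int) :=
  match st with
  | [] => []
  | (d, k) :: r => if k ≥ 3 then r else (d, k) :: r

-- res = ''; for c, count in stack: res += count * c   (Python order = our reverse)
def renderA (st : List (Char × Int)) : List Char :=
  st.reverse.foldl (fun acc p => acc ++ List.replicate p.2.toNat p.1) []

def candy_crush_1d (s : String) : String :=
  String.mk (renderA (finalizeA (s.toList.foldl pushA [])))

-- ===== PORT B =====
-- the inner scan of step: the maximal run of c at the front of t, and the rest
def spanEq (c : Char) : List Char → List Char × List Char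
  | [] => ([], [])
  | d :: t => if d = c then (d :: (spanEq c t).1, (spanEq c t).2) else ([], d :: t)

lemma spanEq_snd_length (c : Char) (t : List Char) : (spanEq c t).2.length ≤ t.length := by
  induction t with
  | nil => simp [spanEq]
  | cons d t ih =>
    simp only [spanEq]
    split
    · simpa using Nat.le_succ_of_le ih
    · simp

lemma spanEq_append (c : Char) (t : List Char) : (spanEq c t).1 ++ (spanEq c t).2 = t := by
  induction t with
  | nil => simp [spanEq]
  | cons d t ih =>
    simp only [spanEq]
    split
    · rename_i h; simpa [h] using ih
    · simp

-- step(t): remove the leftmost maximal run of length >= 3; none if there is no such run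
def stepB : List Char → Option (List Char)
  | [] => none
  | c :: t =>
    if 1 + (spanEq c t).1.length ≥ 3 then some (spanEq c t).2
    else (stepB (spanEq c t).2).map (fun u => c :: (spanEq c t).1 ++ u)
termination_by l => l.length
decreasing_by simpa using Nat.lt_succ_of_le (spanEq_snd_length c t)

lemma stepB_some_length : ∀ (l l' : List Char), stepB l = some l' → l'.length < l.length := by
  intro l
  induction l using stepB.induct with
  | case1 => intro l' h; simp [stepB] at h
  | case2 c t hbig =>
    intro l' h
    rw [stepB] at h
    rw [if_pos hbig] at h
    cases h
    simpa using Nat.lt_succ_of_le (spanEq_snd_length c t)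
  | case3 c t hbig ih =>
    intro l' h
    rw [stepB] at h
    rw [if_neg hbig] at h
    rcases Option.map_eq_some_iff.mp h with ⟨u, hu, rfl⟩
    have h2 := ih u hu
    have h3 : (spanEq c t).1.length + (spanEq c t).2.length = t.length := by
      have := congrArg List.length (spanEq_append c t)
      rwa [List.length_append] at this
    simp only [List.length_cons, List.length_append]
    omega

-- the while-True loop: apply step until it returns none
def loopB (l : List Char) : List Char :=
  match h : stepB l with
  | none => l
  | some t => loopB t
termination_by l.length
decreasing_by exact stepB_some_length _ _ h

def candy_crush_1d_alt (s : String) : String := String.mk (loopB s.toList)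

-- ===== PRECONDITION & SPEC =====
def Spec_candy_crush_1d (s : String) (out : String) : Prop := out = candy_crush_1d_alt s
instance (s : String) (out : String) : Decidable (Spec_candy_crush_1d s out) := by unfold Spec_candy_crush_1d; infer_instance

-- ===== CLAIM (what is proved, stated in full; the proofs are below) =====
def Claim_equal_candy_crush_1d : Prop := ∀ (s : String), Dom_candy_crush_1d s → Spec_candy_crush_1d s (candy_crush_1d s)

-- ===== LEMMAS AND PROOFS =====

-- spanEq facts
lemma spanEq_replicate (c : Char) (t : List Char) :
    (spanEq c t).1 = List.replicate (spanEq c t).1.length c := by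
  induction t with
  | nil => simp [spanEq]
  | cons d t ih =>
    simp only [spanEq]
    split
    · rename_i h
      subst h
      rw [List.length_cons, List.replicate_succ]
      exact congrArg (List.cons _) ih
    · simp

lemma spanEq_head (c : Char) (t : List Char) :
    ∀ d t2, (spanEq c t).2 = d :: t2 → d ≠ c := by
  induction t with
  | nil => intro d t2 h; simp [spanEq] at h
  | cons e t ih =>
    intro d t2 h
    simp only [spanEq] at h
    split at h
    · exact ih d t2 h
    · rename_i hne; cases h; exact hne

-- stack hypothesis: the top of st (if any) has count < 3 and differs from the next char of l
def Hst (st : List (Char × Int)) (l : List Char) : Prop :=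
  ∀ d m r, st = (d, m) :: r → m < 3 ∧ ∀ e t, l = e :: t → d ≠ e

-- pushing a char on a small, different-char top just pushes (c, 1)
lemma pushA_new (st : List (Char × Int)) (c : Char)
    (h : ∀ d m r, st = (d, m) :: r → m < 3 ∧ d ≠ c) :
    pushA st c = (c, 1) :: st := by
  cases st with
  | nil => rfl
  | cons p r =>
    obtain ⟨d, m⟩ := p
    obtain ⟨hm, hd⟩ := h d m r rfl
    simp [pushA, hd, not_le.mpr hm]

-- pushing the same char n more times increments the top count n times
lemma pushA_same (c : Char) (n : ℕ) : ∀ (k : Int) (st : List (Char × Int)),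
    (List.replicate n c).foldl pushA ((c, k) :: st) = (c, k + n) :: st := by
  induction n with
  | zero => intro k st; simp
  | succ n ih =>
    intro k st
    have hstep : pushA ((c, k) :: st) c = (c, k + 1) :: st := by simp [pushA]
    rw [List.replicate_succ, List.foldl_cons, hstep, ih]
    congr 2
    push_cast
    ring

-- pushing a whole fresh run
lemma pushA_run (st : List (Char × Int)) (c : Char) (n : ℕ)
    (h : ∀ d m r, st = (d, m) :: r → m < 3 ∧ d ≠ c) :
    (List.replicate (n + 1) c).foldl pushA st = (c, 1 + (n : Int)) :: st := by
  rw [List.replicate_succ, List.foldl_cons, pushA_new st c h, pushA_same]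

-- a big top is popped (and then ignored) by the next different char
lemma pushA_pop (c d : Char) (k : Int) (st : List (Char × Int))
    (hd : d ≠ c) (hk : 3 ≤ k) (hst : ∀ e m r, st = (e, m) :: r → m < 3) :
    pushA ((c, k) :: st) d = pushA st d := by
  have hcd : ¬ (c = d) := fun h => hd h.symm
  cases st with
  | nil => simp [pushA, hcd, hk]
  | cons p r =>
    obtain ⟨e, m⟩ := p
    have hm : m < 3 := (hst e m r rfl)
    by_cases he : e = d
    · simp [pushA, hcd, hk, he]
    · simp [pushA, hcd, hk, he, not_le.mpr hm]

lemma finalizeA_small (st : List (Char × Int))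
    (hst : ∀ e m r, st = (e, m) :: r → m < 3) : finalizeA st = st := by
  cases st with
  | nil => rfl
  | cons p r =>
    obtain ⟨e, m⟩ := p
    simp [finalizeA, not_le.mpr (hst e m r rfl)]

lemma renderA_cons (c : Char) (k : Int) (st : List (Char × Int)) :
    renderA ((c, k) :: st) = renderA st ++ List.replicate k.toNat c := by
  simp [renderA, List.foldl_append]

-- a string with no big run passes through the machine untouched
lemma eval_none : ∀ (N : ℕ) (l : List Char) (st : List (Char × Int)), l.length ≤ N →
    stepB l = none → Hst st l →
    renderA (finalizeA (l.foldl pushA st)) = renderA st ++ l := by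
  intro N
  induction N with
  | zero =>
    intro l st hlen _ hst
    interval_cases hl : l.length
    · rw [List.length_eq_zero_iff] at hl
      subst hl
      simp only [List.foldl_nil, List.append_nil]
      rw [finalizeA_small st (fun e m r h => (hst e m r h).1)]
  | succ N ih =>
    intro l st hlen hstep hst
    cases l with
    | nil =>
      simp only [List.foldl_nil, List.append_nil]
      rw [finalizeA_small st (fun e m r h => (hst e m r h).1)]
    | cons c t =>
      rw [stepB] at hstep
      split at hstep
      · exact absurd hstep (by simp)
      · rename_i hsmall
        rw [Option.map_eq_none_iff] at hstep
        set n := (spanEq c t).1.length with hn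
        have hdecomp : (c :: t) = List.replicate (n + 1) c ++ (spanEq c t).2 := by
          rw [List.replicate_succ]
          simp only [List.cons_append, List.cons.injEq, true_and]
          conv_lhs => rw [← spanEq_append c t]
          rw [← spanEq_replicate c t]
        have hpush : (c :: t).foldl pushA st
            = (spanEq c t).2.foldl pushA ((c, 1 + (n : Int)) :: st) := by
          conv_lhs => rw [hdecomp]
          rw [List.foldl_append]
          rw [pushA_run st c n (fun d m r h => ⟨(hst d m r h).1, (hst d m r h).2 c t rfl⟩)]
        have hst' : Hst ((c, 1 + (n : Int)) :: st) (spanEq c t).2 := by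
          intro d m r h
          cases h
          constructor
          · omega
          · intro e t2 h2
            exact (spanEq_head c t e t2 h2).symm
        have hlen' : (spanEq c t).2.length ≤ N := by
          have := spanEq_snd_length c t
          simp at hlen
          omega
        have := ih (spanEq c t).2 ((c, 1 + (n : Int)) :: st) hlen' hstep hst'
        calc renderA (finalizeA ((c :: t).foldl pushA st))
            = renderA ((c, 1 + (n : Int)) :: st) ++ (spanEq c t).2 := by rw [hpush]; exact this
          _ = renderA st ++ (c :: t) := by
              rw [renderA_cons]
              have h1 : ((1 : Int) + (n : Int)).toNat = n + 1 := by omega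
              rw [h1, List.append_assoc]
              congr 1
              exact hdecomp.symm

-- removing the leftmost big run does not change the machine's output
lemma Hst_nil (l : List Char) : Hst [] l := by
  intro d m r h
  exact absurd h (by simp)

lemma eval_step : ∀ (N : ℕ) (l l' : List Char) (st : List (Char × Int)), l.length ≤ N →
    stepB l = some l' → Hst st l →
    renderA (finalizeA (l.foldl pushA st)) = renderA (finalizeA (l'.foldl pushA st)) := by
  intro N
  induction N with
  | zero =>
    intro l l' st hlen hstep hst
    rw [Nat.le_zero, List.length_eq_zero_iff] at hlen
    subst hlen
    exact absurd hstep (by simp [stepB])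
  | succ N ih =>
    intro l l' st hlen hstep hst
    cases l with
    | nil => exact absurd hstep (by simp [stepB])
    | cons c t =>
      set n := (spanEq c t).1.length with hn
      have hdecomp : (c :: t) = List.replicate (n + 1) c ++ (spanEq c t).2 := by
        rw [List.replicate_succ]
        simp only [List.cons_append, List.cons.injEq, true_and]
        conv_lhs => rw [← spanEq_append c t]
        rw [← spanEq_replicate c t]
      have hpush : (c :: t).foldl pushA st
          = (spanEq c t).2.foldl pushA ((c, 1 + (n : Int)) :: st) := by
        conv_lhs => rw [hdecomp]
        rw [List.foldl_append]
        rw [pushA_run st c n (fun d m r h => ⟨(hst d m r h).1, (hst d m r h).2 c t rfl⟩)]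
      rw [stepB] at hstep
      split at hstep
      · -- big run: l' is the rest of the string
        rename_i hbig
        have hK : (3 : Int) ≤ 1 + (n : Int) := by
          have : 3 ≤ 1 + n := hbig
          omega
        cases hstep
        rw [hpush]
        cases hrest : (spanEq c t).2 with
        | nil =>
          simp only [List.foldl_nil]
          rw [finalizeA_small st (fun e m r h => (hst e m r h).1)]
          simp [finalizeA, hK]
        | cons d t2 =>
          simp only [List.foldl_cons]
          rw [pushA_pop c d (1 + (n : Int)) st (spanEq_head c t d t2 hrest) hK
            (fun e m r h => (hst e m r h).1)]
      · -- small run: recurse on the rest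
        rename_i hsmall
        rcases Option.map_eq_some_iff.mp hstep with ⟨u, hu, rfl⟩
        have hpush' : (c :: (spanEq c t).1 ++ u).foldl pushA st
            = u.foldl pushA ((c, 1 + (n : Int)) :: st) := by
          have : (c :: (spanEq c t).1 ++ u) = List.replicate (n + 1) c ++ u := by
            rw [List.replicate_succ]
            simp only [List.cons_append, List.cons.injEq, true_and]
            rw [← spanEq_replicate c t]
          rw [this, List.foldl_append]
          rw [pushA_run st c n (fun d m r h => ⟨(hst d m r h).1, (hst d m r h).2 c t rfl⟩)]
        have hst' : Hst ((c, 1 + (n : Int)) :: st) (spanEq c t).2 := by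
          intro d m r h
          cases h
          refine ⟨by have : ¬ 3 ≤ 1 + n := hsmall; omega, ?_⟩
          intro e t2 h2
          exact (spanEq_head c t e t2 h2).symm
        have hlen' : (spanEq c t).2.length ≤ N := by
          have := spanEq_snd_length c t
          simp at hlen
          omega
        rw [hpush, hpush']
        exact ih (spanEq c t).2 u ((c, 1 + (n : Int)) :: st) hlen' hu hst'

-- the machine output equals the fixpoint loop
lemma eval_loopB : ∀ (N : ℕ) (l : List Char), l.length ≤ N →
    renderA (finalizeA (l.foldl pushA [])) = loopB l := by
  intro N
  induction N with
  | zero =>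
    intro l hlen
    rw [Nat.le_zero, List.length_eq_zero_iff] at hlen
    subst hlen
    rw [loopB]
    simp [stepB, finalizeA, renderA]
  | succ N ih =>
    intro l hlen
    cases h : stepB l with
    | none =>
      have := eval_none (N + 1) l [] hlen h (Hst_nil l)
      rw [loopB]
      split
      · simpa [renderA] using this
      · rename_i t heq
        rw [h] at heq
        cases heq
    | some t =>
      have h1 := eval_step (N + 1) l t [] hlen h (Hst_nil l)
      have hlt := stepB_some_length l t h
      have h2 := ih t (by omega)
      rw [h1, h2]
      conv_rhs => rw [loopB]
      split
      · rename_i heq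
        rw [h] at heq
        cases heq
      · rename_i t2 heq
        rw [h] at heq
        cases heq
        rfl

-- ===== VERDICT (by name: the statement is the Claim_ definition above) =====
theorem candy_crush_1d_spec : Claim_equal_candy_crush_1d := by
  intro s _
  unfold Spec_candy_crush_1d candy_crush_1d candy_crush_1d_alt
  exact congrArg String.mk (eval_loopB s.toList.length s.toList le_rfl)
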